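-- pv_equiv track=rewrite | github.com/TFHVoe/RunningDinner | VS_code/main.py | ElkeGangAnderAdres
-- ===== SOURCE A (Python) =====
-- def ElkeGangAnderAdres(ts):#Functie die telt hoe vaak er niet door een persoon een voor, hoofd en nagerecht gegeten wordt en dat dit op een ander adres is.
--     """Functie die telt hoe vaak niet door ieder persoon 3 gangen op verschillende adressen gegeten wordt."""
--     lst_unique = []
--     for i, j in ts.items():
--         for k in i[0:2:len(i)]: #For loop die een lijst vult met alle unique deelnemers.
--             if k not in lst_unique:
--                 lst_unique.append(k)
--
--     lst_amount = []
--     gangen = ['Voor','Hoofd','Na']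
--     for i in lst_unique:
--         countabc = 0
--         lst_adres = []
--         for j, k in ts.items(): #Een complex van for loops die controlleert dat iedere deelnemer een voor, hoofd en na gerecht eet en dat geen gang op hetzelfde adres gegeten wordt.
--             for l in gangen:
--                 if i == j[0] and j[1] == l and k not in lst_adres:
--                     countabc += 1
--                     lst_adres.append(k)
--         lst_amount.append(countabc)
--
--     fout_count = 0
--     for i in lst_amount:
--         if i != 3:      #Een for loop die telt hoe vaak er niet voldaan wordt aan de eisen dat er een voor, hoofd en nagerecht gegeten wordt en dat dit op een ander adres is.
--             fout_count += 1
--     return fout_count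
-- ===== SOURCE B (Python) =====
-- def ElkeGangAnderAdres(ts):
--     """Functie die telt hoe vaak niet door ieder persoon 3 gangen op verschillende adressen gegeten wordt."""
--     gangen = ('Voor', 'Hoofd', 'Na')
--     adressen = {}
--     for key, adres in ts.items():
--         s = adressen.setdefault(key[0], set())
--         if key[1] in gangen:
--             s.add(adres)
--     fout_count = 0
--     for s in adressen.values():
--         if len(s) != 3:
--             fout_count += 1
--     return fout_count
-- ===== Notes on version B (the rewrite author's own statement) =====
-- stated objective: faster
-- what changed: Replaced the O(P*N) rescan (for every unique person a fresh pass over the whole dict with a linear 'not in' address list) by one pass that groups addresses per person in a dict of sets, then counts persons whose set size is not 3.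
import Mathlib
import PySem

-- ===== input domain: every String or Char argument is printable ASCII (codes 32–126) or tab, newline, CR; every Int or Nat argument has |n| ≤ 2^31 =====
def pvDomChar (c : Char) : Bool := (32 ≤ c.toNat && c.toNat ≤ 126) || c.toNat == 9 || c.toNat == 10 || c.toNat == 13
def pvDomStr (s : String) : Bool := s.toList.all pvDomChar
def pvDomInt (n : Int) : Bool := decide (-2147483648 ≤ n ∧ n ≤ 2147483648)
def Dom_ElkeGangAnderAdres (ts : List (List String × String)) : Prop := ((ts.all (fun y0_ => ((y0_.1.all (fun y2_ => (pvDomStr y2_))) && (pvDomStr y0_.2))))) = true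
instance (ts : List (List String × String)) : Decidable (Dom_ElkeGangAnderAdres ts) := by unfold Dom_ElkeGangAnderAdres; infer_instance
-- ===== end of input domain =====

-- B replaces A's per-unique-person rescan of the whole dict by one grouping pass into a dict of
-- per-person address sets (measured faster at the large sizes); ts is a Python dict, ported as an
-- association list.

-- ===== PORT A =====
-- hand port of the slice i[0:2:step] (PySem.List.slice has no step argument): exact for
-- step ≥ 1 (Python takes indices range(0, 2, step), out-of-range ones clamped away); step ≤ 0
-- (Python raises ValueError for step 0) never occurs under Pre_ (keys have length ≥ 2).
def pvSlice02 (xs : List String) (step : Int) : List String :=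
  if step ≤ 0 then []
  else (PySem.List.pyRange 0 2 step).filterMap (fun i => xs[i.toNat]?)

def ElkeGangAnderAdres (ts : List (List String × String)) : Int :=
  let lst_unique : List String := ts.foldl
    (fun lst p => (pvSlice02 p.1 (PySem.List.len p.1)).foldl
      (fun lst k => if k ∈ lst then lst else lst ++ [k]) lst) []
  let gangen : List String := ["Voor", "Hoofd", "Na"]
  let lst_amount : List Int := lst_unique.foldl
    (fun am i =>
      let st := ts.foldl
        (fun (st : Int × List String) p =>
          gangen.foldl
            (fun st l =>
              if i = PySem.List.pyGetD p.1 0 "" ∧ PySem.List.pyGetD p.1 1 "" = l ∧ p.2 ∉ st.2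
              then (st.1 + 1, st.2 ++ [p.2]) else st) st)
        (0, [])
      am ++ [st.1]) []
  lst_amount.foldl (fun c i => if i ≠ 3 then c + 1 else c) 0

-- ===== PORT B =====
-- one entry of B's grouping pass: s = adressen.setdefault(key[0], set()); if key[1] in gangen: s.add(adres)
def pvStepB (d : PySem.Dict String (PySem.Set String)) (p : List String × String) :
    PySem.Dict String (PySem.Set String) :=
  let d := d.setdefault (PySem.List.pyGetD p.1 0 "") PySem.Set.empty
  if ["Voor", "Hoofd", "Na"].contains (PySem.List.pyGetD p.1 1 "")
  then d.modify (PySem.List.pyGetD p.1 0 "") PySem.Set.empty (fun s => PySem.Set.add s p.2)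
  else d

def ElkeGangAnderAdres_alt (ts : List (List String × String)) : Int :=
  let adressen := ts.foldl pvStepB PySem.Dict.empty
  adressen.values.foldl (fun c s => if PySem.Set.len s ≠ 3 then c + 1 else c) 0

-- ===== PRECONDITION & SPEC =====
-- Pre_ excludes (a) keys of length < 2, on which Python A raises (ValueError from a zero slice
-- step, or IndexError from key[1]); (b) association lists with duplicate keys, which a Python
-- dict (the actual argument of both A and B) cannot represent.
def Pre_ElkeGangAnderAdres (ts : List (List String × String)) : Prop :=
  (∀ p ∈ ts, 2 ≤ p.1.length) ∧ (ts.map (·.1)).Nodup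
instance (ts : List (List String × String)) : Decidable (Pre_ElkeGangAnderAdres ts) := by
  unfold Pre_ElkeGangAnderAdres; infer_instance

def pvWitness_ElkeGangAnderAdres : (List (List String × String)) :=
  [(["An", "Voor"], "a1"), (["An", "Hoofd"], "a2"), (["An", "Na"], "a3"), (["Bo", "Voor"], "a1")]

def Spec_ElkeGangAnderAdres (ts : List (List String × String)) (out : Int) : Prop := out = ElkeGangAnderAdres_alt ts
instance (ts : List (List String × String)) (out : Int) : Decidable (Spec_ElkeGangAnderAdres ts out) := by unfold Spec_ElkeGangAnderAdres; infer_instance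

-- ===== CLAIM (what is proved, stated in full; the proofs are below) =====
def Claim_equal_ElkeGangAnderAdres : Prop := ∀ (ts : List (List String × String)), Dom_ElkeGangAnderAdres ts → Pre_ElkeGangAnderAdres ts → Spec_ElkeGangAnderAdres ts (ElkeGangAnderAdres ts)

-- ===== LEMMAS AND PROOFS =====

-- the first (person) component of an entry's key
def pvHead (p : List String × String) : String := PySem.List.pyGetD p.1 0 ""

-- the addresses of the entries of person i whose course is one of the three gangen
def pvAddrs (i : String) (ts : List (List String × String)) : List String :=
  (ts.filter (fun p => pvHead p == i &&
    ["Voor", "Hoofd", "Na"].contains (PySem.List.pyGetD p.1 1 ""))).map (·.2)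

-- on a key of length ≥ 2 the slice i[0:2:len(i)] is [i[0]]
theorem pvSlice02_of_len_ge_two (xs : List String) (h : 2 ≤ xs.length) :
    pvSlice02 xs (PySem.List.len xs) = [PySem.List.pyGetD xs 0 ""] := by
  have hs : (0:Int) < PySem.List.len xs := by simp [PySem.List.len]; omega
  have hr := PySem.List.pyRange_of_pos 0 2 hs
  have h1 : ((2 - 0 + PySem.List.len xs - 1) / PySem.List.len xs).toNat = 1 := by
    simp only [PySem.List.len_eq]
    have h2 : (2 - 0 + (xs.length:Int) - 1) = ((1 + xs.length : Nat) : Int) := by push_cast; ring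
    have h3 : (1 + xs.length) / xs.length = 1 := Nat.div_eq_of_lt_le (by omega) (by omega)
    rw [h2, Int.ofNat_ediv_ofNat, h3]
    rfl
  rw [pvSlice02, if_neg (by omega), hr, if_pos (by norm_num), h1]
  simp [List.range_succ, PySem.List.pyGetD_of_nonneg, List.getElem?_eq_getElem (by omega : 0 < xs.length)]

-- A's inner fold over the three course literals fires at most once
theorem pvGangStep (i hp cp a : String) (st : Int × List String) :
    (["Voor", "Hoofd", "Na"].foldl
      (fun st l => if i = hp ∧ cp = l ∧ a ∉ st.2 then (st.1 + 1, st.2 ++ [a]) else st) st)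
    = if i = hp ∧ ["Voor", "Hoofd", "Na"].contains cp ∧ a ∉ st.2
      then (st.1 + 1, st.2 ++ [a]) else st := by
  by_cases h1 : cp = "Voor" <;> by_cases h2 : cp = "Hoofd" <;> by_cases h3 : cp = "Na" <;>
    subst_vars <;> simp_all [List.foldl]

theorem pv_len_le_update (s : PySem.Set String) (l : List String) :
    s.length ≤ (PySem.Set.update s l).length := by
  induction l generalizing s with
  | nil => simp [PySem.Set.update]
  | cons x xs ih =>
    rw [PySem.Set.update_cons]
    refine le_trans ?_ (ih _)
    rw [PySem.Set.add_eq_ite]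
    split_ifs <;> simp

-- A's per-person double loop updates the per-person address set and counts its growth
theorem pvInnerA (i : String) (ts : List (List String × String)) (c : Int) (s : List String) :
    (ts.foldl
      (fun (st : Int × List String) p =>
        ["Voor", "Hoofd", "Na"].foldl
          (fun st l =>
            if i = pvHead p ∧ PySem.List.pyGetD p.1 1 "" = l ∧ p.2 ∉ st.2
            then (st.1 + 1, st.2 ++ [p.2]) else st) st)
      (c, s))
    = (c + ((PySem.Set.update s (pvAddrs i ts)).length - s.length : Int),
       PySem.Set.update s (pvAddrs i ts)) := by
  induction ts generalizing c s with
  | nil => simp [pvAddrs, PySem.Set.update]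
  | cons p rest ih =>
    rw [List.foldl_cons, pvGangStep]
    have haddr : pvAddrs i (p :: rest)
        = if (pvHead p == i && ["Voor","Hoofd","Na"].contains (PySem.List.pyGetD p.1 1 "")) = true
          then p.2 :: pvAddrs i rest else pvAddrs i rest := by
      simp only [pvAddrs, List.filter_cons]
      split_ifs <;> simp
    by_cases hc : i = pvHead p ∧ ["Voor","Hoofd","Na"].contains (PySem.List.pyGetD p.1 1 "") = true ∧ p.2 ∉ s
    · rw [if_pos (by simpa using hc)]
      obtain ⟨h1, h2, h3⟩ := hc
      rw [ih]
      rw [haddr, if_pos (by simp only [h1.symm, h2, beq_self_eq_true, Bool.true_and])]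
      rw [PySem.Set.update_cons, PySem.Set.add_of_not_mem h3, Prod.mk.injEq]
      constructor
      · have := pv_len_le_update (s ++ [p.2]) (pvAddrs i rest)
        simp only [List.length_append, List.length_singleton] at *
        omega
      · rfl
    · rw [if_neg (by intro h; exact hc ⟨h.1, by exact_mod_cast h.2.1, h.2.2⟩)]
      rw [ih]
      by_cases hm : i = pvHead p ∧ ["Voor","Hoofd","Na"].contains (PySem.List.pyGetD p.1 1 "") = true
      · have hmem : p.2 ∈ s := by
          by_contra hn
          exact hc ⟨hm.1, hm.2, hn⟩
        rw [haddr, if_pos (by simp only [hm.1.symm, hm.2, beq_self_eq_true, Bool.true_and])]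
        rw [PySem.Set.update_cons, PySem.Set.add_of_mem hmem]
      · rw [haddr, if_neg (by simp only [Bool.and_eq_true, beq_iff_eq]; intro h; exact hm ⟨h.1.symm, h.2⟩)]

-- one step of B's loop, seen through getD
theorem pvStepB_getD (d : PySem.Dict String (PySem.Set String)) (p : List String × String)
    (i : String) :
    (pvStepB d p).getD i PySem.Set.empty
    = if i = pvHead p ∧ ["Voor","Hoofd","Na"].contains (PySem.List.pyGetD p.1 1 "") = true
      then PySem.Set.add (d.getD i PySem.Set.empty) p.2
      else d.getD i PySem.Set.empty := by
  unfold pvStepB pvHead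
  have hsd : ∀ j, (d.setdefault (PySem.List.pyGetD p.1 0 "") PySem.Set.empty).getD j PySem.Set.empty
      = d.getD j PySem.Set.empty := by
    intro j
    by_cases hj : j = PySem.List.pyGetD p.1 0 ""
    · rw [hj, PySem.Dict.getD_setdefault_self]
    · rw [PySem.Dict.getD_eq_get?_getD, PySem.Dict.get?_setdefault_of_ne _ _ hj,
        ← PySem.Dict.getD_eq_get?_getD]
  by_cases hg : ["Voor","Hoofd","Na"].contains (PySem.List.pyGetD p.1 1 "") = true
  · rw [if_pos hg, PySem.Dict.getD_modify]
    by_cases hi : i = PySem.List.pyGetD p.1 0 ""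
    · rw [if_pos hi, if_pos ⟨hi, hg⟩, hsd, hi]
    · rw [if_neg hi, if_neg (fun h => hi h.1), hsd]
  · rw [if_neg hg, hsd, if_neg (fun h => hg h.2)]

-- B's loop computes, per person, the set of that person's valid-course addresses
theorem pvDictB_getD (ts : List (List String × String)) (d : PySem.Dict String (PySem.Set String))
    (i : String) :
    (ts.foldl pvStepB d).getD i PySem.Set.empty
    = PySem.Set.update (d.getD i PySem.Set.empty) (pvAddrs i ts) := by
  induction ts generalizing d with
  | nil => simp [pvAddrs, PySem.Set.update]
  | cons p rest ih =>
    rw [List.foldl_cons, ih, pvStepB_getD]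
    have haddr : pvAddrs i (p :: rest)
        = if (pvHead p == i && ["Voor","Hoofd","Na"].contains (PySem.List.pyGetD p.1 1 "")) = true
          then p.2 :: pvAddrs i rest else pvAddrs i rest := by
      simp only [pvAddrs, List.filter_cons]
      split_ifs <;> simp
    by_cases hc : i = pvHead p ∧ ["Voor","Hoofd","Na"].contains (PySem.List.pyGetD p.1 1 "") = true
    · rw [if_pos hc, haddr, if_pos (by simp only [hc.1.symm, hc.2, beq_self_eq_true, Bool.true_and]),
        PySem.Set.update_cons]
    · rw [if_neg hc, haddr, if_neg (by simp only [Bool.and_eq_true, beq_iff_eq]; intro h; exact hc ⟨h.1.symm, h.2⟩)]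

theorem pvStepB_keys (d : PySem.Dict String (PySem.Set String)) (p : List String × String) :
    (pvStepB d p).keys = PySem.Set.add d.keys (pvHead p) := by
  unfold pvStepB pvHead
  have hk : (d.setdefault (PySem.List.pyGetD p.1 0 "") PySem.Set.empty).keys
      = PySem.Set.add d.keys (PySem.List.pyGetD p.1 0 "") := by
    rw [PySem.Dict.keys_setdefault, PySem.Set.add_eq_ite,
      PySem.Dict.contains_eq_decide_mem_keys]
    split_ifs <;> simp_all
  split_ifs with hg
  · rw [PySem.Dict.keys_modify, PySem.Dict.keys_insert_of_contains, hk]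
    rw [PySem.Dict.contains_setdefault]
    simp
  · exact hk

-- B's key list is the persons in first-appearance order
theorem pvDictB_keys (ts : List (List String × String)) (d : PySem.Dict String (PySem.Set String)) :
    (ts.foldl pvStepB d).keys = PySem.Set.update d.keys (ts.map pvHead) := by
  induction ts generalizing d with
  | nil => simp [PySem.Set.update]
  | cons p rest ih =>
    rw [List.foldl_cons, ih, pvStepB_keys, List.map_cons, PySem.Set.update_cons]

theorem pvMain (ts : List (List String × String)) (hpre : ∀ p ∈ ts, 2 ≤ p.1.length) :
    ElkeGangAnderAdres ts = ElkeGangAnderAdres_alt ts := by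
  unfold ElkeGangAnderAdres ElkeGangAnderAdres_alt
  -- the unique-person list of A is the key list of B's dict
  have hu : ts.foldl
      (fun lst p => (pvSlice02 p.1 (PySem.List.len p.1)).foldl
        (fun lst k => if k ∈ lst then lst else lst ++ [k]) lst) []
      = PySem.Set.ofList (ts.map pvHead) := by
    rw [PySem.List.foldl_congr_mem ts _ (fun lst p => PySem.Set.add lst (pvHead p)) []
      (by
        intro acc p hp
        rw [pvSlice02_of_len_ge_two p.1 (hpre p hp)]
        simp only [List.foldl_cons, List.foldl_nil, PySem.Set.add_eq_ite, pvHead])]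
    rw [← PySem.Set.update_map_eq_foldl_add, PySem.Set.update_nil_left]
  simp only [hu]
  -- A's amount list entry for person i is the size of that person's address set
  rw [show (fun (am : List Int) (i : String) =>
      am ++ [(ts.foldl
        (fun (st : Int × List String) p =>
          ["Voor", "Hoofd", "Na"].foldl
            (fun st l =>
              if i = PySem.List.pyGetD p.1 0 "" ∧ PySem.List.pyGetD p.1 1 "" = l ∧ p.2 ∉ st.2
              then (st.1 + 1, st.2 ++ [p.2]) else st) st)
        (0, [])).1])
    = (fun (am : List Int) (i : String) =>
        am ++ [((PySem.Set.ofList (pvAddrs i ts)).length : Int)])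
    from funext fun am => funext fun i => by
      rw [show (fun (st : Int × List String) (p : List String × String) =>
          ["Voor", "Hoofd", "Na"].foldl
            (fun st l =>
              if i = PySem.List.pyGetD p.1 0 "" ∧ PySem.List.pyGetD p.1 1 "" = l ∧ p.2 ∉ st.2
              then (st.1 + 1, st.2 ++ [p.2]) else st) st)
        = (fun (st : Int × List String) (p : List String × String) =>
            ["Voor", "Hoofd", "Na"].foldl
              (fun st l =>
                if i = pvHead p ∧ PySem.List.pyGetD p.1 1 "" = l ∧ p.2 ∉ st.2
                then (st.1 + 1, st.2 ++ [p.2]) else st) st) from rfl]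
      rw [pvInnerA i ts 0 []]
      simp [PySem.Set.update_nil_left]]
  rw [PySem.List.foldl_append_singleton_eq_map]
  -- B's value list is the same list of address sets
  have hnd : (ts.foldl pvStepB PySem.Dict.empty).keys.Nodup := by
    rw [pvDictB_keys, PySem.Dict.keys_empty, PySem.Set.update_nil_left]
    exact PySem.Set.nodup_ofList _
  rw [PySem.Dict.values_eq_map_keys _ hnd PySem.Set.empty, pvDictB_keys,
    PySem.Dict.keys_empty, PySem.Set.update_nil_left]
  rw [show (fun k => (ts.foldl pvStepB PySem.Dict.empty).getD k PySem.Set.empty)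
      = (fun k => PySem.Set.ofList (pvAddrs k ts)) from funext fun k => by
    rw [pvDictB_getD, PySem.Dict.getD_empty, PySem.Set.update_empty]]
  rw [List.nil_append, List.foldl_map, List.foldl_map]
  refine PySem.List.foldl_congr_mem _ _ _ _ ?_
  intro acc k hk
  simp [PySem.Set.len]

-- ===== VERDICT (by name: the statement is the Claim_ definition above) =====
theorem ElkeGangAnderAdres_spec : Claim_equal_ElkeGangAnderAdres := by
  intro ts _ hpre
  unfold Spec_ElkeGangAnderAdres
  exact pvMain ts hpre.1
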